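-- pv_equiv track=rewrite | github.com/joony74/atoll_project | app/engines/parser/auto_normalizer.py | _integer_log
-- ===== SOURCE A (Python) =====
-- def _integer_log(value: int, base: int) -> int | None:
--     if base <= 1 or value <= 0:
--         return None
--     power = 0
--     current = 1
--     while current < value:
--         current *= base
--         power += 1
--     return power if current == value else None
-- ===== SOURCE B (Python) =====
-- def _integer_log(value: int, base: int) -> int | None:
--     if base <= 1 or value <= 0:
--         return None
--     current = value
--     power = 0
--     while current % base == 0:
--         current //= base
--         power += 1
--     return power if current == 1 else None
-- ===== Notes on version B (the rewrite author's own statement) =====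
-- stated objective: alternative
-- what changed: B divides value down by base testing divisibility of the shrinking quotient, instead of growing a running product from 1 up to value and comparing; both are O(log value) but maintain opposite invariants.
import Mathlib
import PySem

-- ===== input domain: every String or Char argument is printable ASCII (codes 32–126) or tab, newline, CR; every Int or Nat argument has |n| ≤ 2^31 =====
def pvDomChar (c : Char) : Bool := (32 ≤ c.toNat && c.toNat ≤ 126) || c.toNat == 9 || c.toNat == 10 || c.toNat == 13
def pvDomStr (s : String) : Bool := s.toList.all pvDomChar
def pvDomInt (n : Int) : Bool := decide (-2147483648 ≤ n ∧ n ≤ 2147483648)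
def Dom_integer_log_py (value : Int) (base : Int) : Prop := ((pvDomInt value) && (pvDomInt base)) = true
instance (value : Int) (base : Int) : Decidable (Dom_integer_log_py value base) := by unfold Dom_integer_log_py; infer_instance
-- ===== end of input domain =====

-- B replaces A's grow-a-product loop by repeated exact division of value by base (alternative decomposition; same value everywhere, both total).

-- ===== PORT A =====
-- while current < value: current *= base; power += 1  (proof args hb/hc only justify termination)
def pvLoopA (value base current power : Int) (hb : 2 ≤ base) (hc : 1 ≤ current) : Option Int :=
  if h : current < value then
    pvLoopA value base (current * base) (power + 1) hb (by nlinarith)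
  else if current = value then some power else none
termination_by (value - current).toNat
decreasing_by
  have : current + 1 ≤ current * base := by nlinarith
  omega

def integer_log_py (value : Int) (base : Int) : Option Int :=
  if h : base ≤ 1 ∨ value ≤ 0 then none
  else pvLoopA value base 1 0 (by omega) (by omega)

-- ===== PORT B =====
-- while current % base == 0: current //= base; power += 1  (proof args hb/hc only justify termination)
def pvLoopB (base current power : Int) (hb : 2 ≤ base) (hc : 1 ≤ current) : Option Int :=
  if h : PySem.Int.mod current base = 0 then
    pvLoopB base (PySem.Int.floordiv current base) (power + 1) hb
      (by
        rw [PySem.Int.floordiv_eq_ediv_of_pos (by omega)]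
        rw [PySem.Int.mod_eq_emod_of_pos (by omega)] at h
        have hdvd : base ∣ current := Int.dvd_of_emod_eq_zero h
        have := Int.le_of_dvd (by omega) hdvd
        have : 1 ≤ current / base := by
          have := Int.ediv_le_ediv (by omega : (0:Int) < base) this
          simpa [Int.ediv_self (by omega : (base:Int) ≠ 0)] using this
        exact this)
  else if current = 1 then some power else none
termination_by current.toNat
decreasing_by
  rw [PySem.Int.floordiv_eq_ediv_of_pos (by omega)]
  have h1 : current / base < current := by
    rw [Int.ediv_lt_iff_lt_mul (by omega)]
    nlinarith
  have h2 : 0 ≤ current / base := Int.ediv_nonneg (by omega) (by omega)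
  omega

def integer_log_py_alt (value : Int) (base : Int) : Option Int :=
  if h : base ≤ 1 ∨ value ≤ 0 then none
  else pvLoopB base value 0 (by omega) (by omega)

-- ===== PRECONDITION & SPEC =====
def Spec_integer_log_py (value : Int) (base : Int) (out : Option Int) : Prop := out = integer_log_py_alt value base
instance (value : Int) (base : Int) (out : Option Int) : Decidable (Spec_integer_log_py value base out) := by unfold Spec_integer_log_py; infer_instance

-- ===== CLAIM (what is proved, stated in full; the proofs are below) =====
def Claim_equal_integer_log_py : Prop := ∀ (value : Int) (base : Int), Dom_integer_log_py value base → Spec_integer_log_py value base (integer_log_py value base)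

-- ===== LEMMAS AND PROOFS =====

-- A's loop returns some (power + n) when current * base^n = value
theorem pvLoopA_pow (base : Int) (hb : 2 ≤ base) : ∀ (n : Nat) (current power : Int) (hc : 1 ≤ current)
    (hv : current * base ^ n = value), pvLoopA value base current power hb hc = some (power + n) := by
  intro n
  induction n with
  | zero =>
    intro current power hc hv
    rw [pvLoopA]
    simp at hv
    simp [hv]
  | succ m ih =>
    intro current power hc hv
    rw [pvLoopA]
    have hpow : (1:Int) ≤ base ^ m := one_le_pow₀ (by omega)
    have hlt : current < value := by
      rw [← hv, pow_succ]
      have h2 : 2 ≤ base ^ m * base := by nlinarith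
      nlinarith [mul_le_mul_of_nonneg_left h2 (by omega : (0:Int) ≤ current)]
    rw [dif_pos hlt]
    have := ih (current * base) (power + 1) (by nlinarith) (by rw [← hv]; ring)
    rw [this]
    congr 1
    push_cast
    ring

-- A's loop returns none when no exponent fits
theorem pvLoopA_none (value base : Int) (hb : 2 ≤ base) : ∀ (current power : Int) (hc : 1 ≤ current)
    (hno : ∀ n : Nat, current * base ^ n ≠ value), pvLoopA value base current power hb hc = none := by
  intro current power hc hno
  rw [pvLoopA]
  by_cases hlt : current < value
  · rw [dif_pos hlt]
    exact pvLoopA_none value base hb (current * base) (power + 1) (by nlinarith)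
      (fun n hn => hno (n + 1) (by rw [← hn]; ring))
  · rw [dif_neg hlt]
    have : current ≠ value := fun he => hno 0 (by simpa using he)
    simp [this]
termination_by current => (value - current).toNat
decreasing_by
  have : current + 1 ≤ current * base := by nlinarith
  omega

-- B's loop returns some (power + n) when current = base^n
theorem pvLoopB_pow (base : Int) (hb : 2 ≤ base) : ∀ (n : Nat) (current power : Int) (hc : 1 ≤ current)
    (hv : current = base ^ n), pvLoopB base current power hb hc = some (power + n) := by
  intro n
  induction n with
  | zero =>
    intro current power hc hv
    simp at hv
    subst hv
    rw [pvLoopB]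
    have hm : PySem.Int.mod 1 base ≠ 0 := by
      rw [PySem.Int.mod_eq_emod_of_pos (by omega)]
      rw [Int.emod_eq_of_lt (by omega) (by omega)]
      omega
    simp [hm]
  | succ m ih =>
    intro current power hc hv
    rw [pvLoopB]
    have hm : PySem.Int.mod current base = 0 := by
      rw [PySem.Int.mod_eq_emod_of_pos (by omega), hv, pow_succ]
      simp [Int.mul_emod_left]
    rw [dif_pos hm]
    have hdiv : PySem.Int.floordiv current base = base ^ m := by
      rw [PySem.Int.floordiv_eq_ediv_of_pos (by omega), hv, pow_succ]
      exact Int.mul_ediv_cancel _ (by omega)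
    rw [ih (PySem.Int.floordiv current base) (power + 1)
      (by rw [hdiv]; exact one_le_pow₀ (by omega)) hdiv]
    congr 1
    push_cast
    ring

-- B's loop returns none when current is no power of base
theorem pvLoopB_none (base : Int) (hb : 2 ≤ base) : ∀ (current power : Int) (hc : 1 ≤ current)
    (hno : ∀ n : Nat, current ≠ base ^ n), pvLoopB base current power hb hc = none := by
  intro current power hc hno
  rw [pvLoopB]
  by_cases hm : PySem.Int.mod current base = 0
  · rw [dif_pos hm]
    refine pvLoopB_none base hb _ (power + 1) _ ?_
    intro n hn
    rw [PySem.Int.mod_eq_emod_of_pos (by omega)] at hm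
    have hdvd : base ∣ current := Int.dvd_of_emod_eq_zero hm
    apply hno (n + 1)
    rw [PySem.Int.floordiv_eq_ediv_of_pos (by omega)] at hn
    rw [pow_succ, ← hn]
    exact (Int.ediv_mul_cancel hdvd).symm
  · rw [dif_neg hm]
    have : current ≠ 1 := fun he => hno 0 (by simpa using he)
    simp [this]
termination_by current power hc => current.toNat
decreasing_by
  rw [PySem.Int.floordiv_eq_ediv_of_pos (by omega)]
  have h1 : current / base < current := by
    rw [Int.ediv_lt_iff_lt_mul (by omega)]
    nlinarith
  have h2 : 0 ≤ current / base := Int.ediv_nonneg (by omega) (by omega)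
  omega

-- ===== VERDICT (by name: the statement is the Claim_ definition above) =====
theorem integer_log_py_spec : Claim_equal_integer_log_py := by
  intro value base _
  unfold Spec_integer_log_py integer_log_py integer_log_py_alt
  by_cases h : base ≤ 1 ∨ value ≤ 0
  · simp [h]
  · rw [dif_neg h, dif_neg h]
    have hb : 2 ≤ base := by omega
    have hv : 1 ≤ value := by omega
    by_cases hex : ∃ n : Nat, base ^ n = value
    · obtain ⟨n, hn⟩ := hex
      rw [pvLoopA_pow base hb n 1 0 (by omega) (by simpa using hn),
          pvLoopB_pow base hb n value 0 (by omega) hn.symm]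
    · push_neg at hex
      rw [pvLoopA_none value base hb 1 0 (by omega) (fun n hn => hex n (by simpa using hn)),
          pvLoopB_none base hb value 0 (by omega) (fun n hn => hex n hn.symm)]
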